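-- pv_equiv track=rewrite | github.com/Darshan2042/DSA-Python | Problem_AskIn_CC/Probelm1.py | transfrom_sting
-- ===== SOURCE A (Python) =====
-- def transfrom_sting(s):
--     seen = set()
--     unique_ch = []
--     for ch in s:
--         if ch not in seen:
--             seen.add(ch)
--             unique_ch.append(ch)
--     vowles = []
--     con = []
--     vowles_li = ['a','e','i','o','u']
--     for ch in unique_ch:
--         if ch in vowles_li:
--             vowles.append(ch)
--         else:
--             con.append(ch)
--     vowles.sort()
--     con.sort()
--     return "".join(vowles + con)
-- ===== SOURCE B (Python) =====
-- def transfrom_sting(s):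
--     chars = sorted(set(s))
--     vowels = set("aeiou")
--     return "".join(c for c in chars if c in vowels) + "".join(c for c in chars if c not in vowels)
-- ===== Notes on version B (the rewrite author's own statement) =====
-- stated objective: simpler
-- what changed: B replaces A's ordered-dedup loop, partition loop and two separate sorts by one keyless sort of set(s) followed by a vowel filter and a consonant filter.
import Mathlib
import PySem

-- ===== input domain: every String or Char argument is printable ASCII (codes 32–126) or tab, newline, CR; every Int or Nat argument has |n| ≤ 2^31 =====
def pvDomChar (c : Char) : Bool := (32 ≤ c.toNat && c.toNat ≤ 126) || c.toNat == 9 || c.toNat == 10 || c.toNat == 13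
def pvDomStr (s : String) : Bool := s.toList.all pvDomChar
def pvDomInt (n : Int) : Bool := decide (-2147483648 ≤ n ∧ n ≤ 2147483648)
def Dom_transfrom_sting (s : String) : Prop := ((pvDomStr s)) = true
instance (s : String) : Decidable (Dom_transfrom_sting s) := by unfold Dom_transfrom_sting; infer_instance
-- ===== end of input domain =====

-- B does one keyless sort of the distinct characters and then filters vowels and consonants,
-- instead of A's ordered-dedup loop, partition loop and two separate sorts (objective: simpler).

-- ===== PORT A =====
def pyVowels : List Char := ['a', 'e', 'i', 'o', 'u']

def transfrom_sting (s : String) : String :=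
  let p := s.toList.foldl
    (fun (p : PySem.Set Char × List Char) ch =>
      if ch ∉ p.1 then (PySem.Set.add p.1 ch, p.2 ++ [ch]) else p)
    (PySem.Set.empty, [])
  let q := p.2.foldl
    (fun (q : List Char × List Char) ch =>
      if ch ∈ pyVowels then (q.1 ++ [ch], q.2) else (q.1, q.2 ++ [ch]))
    ([], [])
  String.mk (PySem.List.sorted q.1 (fun c => c) false ++ PySem.List.sorted q.2 (fun c => c) false)

-- ===== PORT B =====
def transfrom_sting_alt (s : String) : String :=
  let chars := PySem.List.sorted (PySem.Set.ofList s.toList) (fun c => c) false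
  let vowels : PySem.Set Char := PySem.Set.ofList "aeiou".toList
  String.mk ((chars.filter (fun c => PySem.Set.contains vowels c)) ++
             (chars.filter (fun c => !PySem.Set.contains vowels c)))

-- ===== PRECONDITION & SPEC =====
def Spec_transfrom_sting (s : String) (out : String) : Prop := out = transfrom_sting_alt s
instance (s : String) (out : String) : Decidable (Spec_transfrom_sting s out) := by unfold Spec_transfrom_sting; infer_instance

-- ===== CLAIM (what is proved, stated in full; the proofs are below) =====
def Claim_equal_transfrom_sting : Prop := ∀ (s : String), Dom_transfrom_sting s → Spec_transfrom_sting s (transfrom_sting s)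

-- ===== LEMMAS AND PROOFS =====

-- A's dedup loop keeps its two accumulators equal and builds exactly Set.update.
theorem dedup_loop (cs : List Char) (t : PySem.Set Char) :
    cs.foldl (fun (p : PySem.Set Char × List Char) ch =>
        if ch ∉ p.1 then (PySem.Set.add p.1 ch, p.2 ++ [ch]) else p) (t, t)
      = (PySem.Set.update t cs, PySem.Set.update t cs) := by
  induction cs generalizing t with
  | nil => simp [PySem.Set.update]
  | cons ch cs ih =>
    have hstep : (if ch ∉ t then (PySem.Set.add t ch, t ++ [ch]) else (t, t))
        = (PySem.Set.add t ch, PySem.Set.add t ch) := by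
      by_cases h : ch ∈ t
      · simp [h]
      · simp [h]
    simp only [List.foldl_cons, hstep, ih, PySem.Set.update_cons]

-- A's partition loop is two filters.
theorem part_loop (u : List Char) (a b : List Char) :
    u.foldl (fun (q : List Char × List Char) ch =>
        if ch ∈ pyVowels then (q.1 ++ [ch], q.2) else (q.1, q.2 ++ [ch])) (a, b)
      = (a ++ u.filter (fun c => decide (c ∈ pyVowels)),
         b ++ u.filter (fun c => !decide (c ∈ pyVowels))) := by
  induction u generalizing a b with
  | nil => simp
  | cons ch u ih =>
    by_cases h : ch ∈ pyVowels
    · simp [h, ih]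
    · simp [h, ih]

-- sorting a filtered sublist of a duplicate-free list = filtering the sorted list
theorem sorted_filter_comm (cs : List Char) (p : Char → Bool) :
    PySem.List.sorted ((PySem.Set.ofList cs).filter p) (fun c => c) false
      = (PySem.List.sorted (PySem.Set.ofList cs) (fun c => c) false).filter p := by
  apply PySem.List.sorted_eq_of_perm_of_pairwise_lt
  · exact (PySem.List.sorted_perm (PySem.Set.ofList cs) (fun c => c) false).filter p
  · exact (PySem.List.sorted_ofList_pairwise_lt cs).sublist List.filter_sublist

theorem vowel_set_eval (c : Char) :
    PySem.Set.contains (PySem.Set.ofList "aeiou".toList) c = decide (c ∈ pyVowels) := by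
  have h : PySem.Set.ofList "aeiou".toList = pyVowels := by decide
  rw [h, PySem.Set.contains_eq_listContains]
  cases hc : decide (c ∈ pyVowels) <;> simp_all

theorem transfrom_sting_eq (s : String) :
    transfrom_sting s = transfrom_sting_alt s := by
  have hded : List.foldl (fun (p : PySem.Set Char × List Char) ch =>
        if ch ∉ p.1 then (PySem.Set.add p.1 ch, p.2 ++ [ch]) else p)
      (PySem.Set.empty, []) s.toList
      = (PySem.Set.ofList s.toList, PySem.Set.ofList s.toList) :=
    dedup_loop s.toList PySem.Set.empty
  simp only [transfrom_sting, transfrom_sting_alt, hded, part_loop, List.nil_append,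
    vowel_set_eval]
  rw [sorted_filter_comm, sorted_filter_comm]

-- ===== VERDICT (by name: the statement is the Claim_ definition above) =====
theorem transfrom_sting_spec : Claim_equal_transfrom_sting := by
  intro s _
  exact transfrom_sting_eq s
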